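-- pv_equiv track=rewrite | github.com/chicago-aiscience/Clinical_KG_OS_LLM | speech_to_transcript.py | add_speaker_labels
-- ===== SOURCE A (Python) =====
-- def add_speaker_labels(segments: list) -> list:
--     """
--     Add rule-based speaker labels (D/P alternating).
--
--     Assumption: Doctor speaks first, then alternates with Patient.
--     This is a simple heuristic - for real diarization use WhisperX/pyannote.
--     """
--     labeled = []
--     # Doctor starts first
--     current_speaker = "D"
--     d_count, p_count = 0, 0
--
--     for seg in segments:
--         if current_speaker == "D":
--             d_count += 1
--             label = f"D-{d_count}"
--             next_speaker = "P"
--         else: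
--             p_count += 1
--             label = f"P-{p_count}"
--             next_speaker = "D"
--
--         labeled.append({
--             **seg,
--             "speaker": current_speaker,
--             "turn_id": label
--         })
--         current_speaker = next_speaker
--
--     return labeled
-- ===== SOURCE B (Python) =====
-- def add_speaker_labels(segments: list) -> list:
--     def labeled(i, seg):
--         sp = "D" if i % 2 == 0 else "P"
--         return {**seg, "speaker": sp, "turn_id": f"{sp}-{i // 2 + 1}"}
--     return [labeled(i, seg) for i, seg in enumerate(segments)]
-- ===== Notes on version B (the rewrite author's own statement) =====
-- stated objective: simpler
-- what changed: Replaces the alternating-state machine (current_speaker/next_speaker and two counters) with a stateless enumerate comprehension deriving speaker and turn id from the index: speaker = 'D' if i % 2 == 0 else 'P', turn number = i // 2 + 1.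
import Mathlib
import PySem

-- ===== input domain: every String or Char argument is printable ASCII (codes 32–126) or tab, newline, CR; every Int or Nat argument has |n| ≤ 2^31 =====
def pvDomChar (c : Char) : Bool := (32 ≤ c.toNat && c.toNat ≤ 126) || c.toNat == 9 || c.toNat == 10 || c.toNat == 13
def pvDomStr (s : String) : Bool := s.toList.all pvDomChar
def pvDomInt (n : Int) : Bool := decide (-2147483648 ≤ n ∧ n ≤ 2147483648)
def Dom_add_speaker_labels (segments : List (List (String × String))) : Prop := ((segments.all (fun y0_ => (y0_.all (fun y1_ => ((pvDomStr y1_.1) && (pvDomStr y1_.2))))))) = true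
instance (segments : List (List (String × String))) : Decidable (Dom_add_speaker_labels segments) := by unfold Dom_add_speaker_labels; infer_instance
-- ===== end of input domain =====

-- B replaces A's alternating-state machine (current_speaker/next_speaker, two counters)
-- with a stateless enumerate: speaker and turn id derived from the index (simpler).

-- ===== PORT A =====
-- {**seg, "speaker": cs, "turn_id": label} as an association list (dict-merge semantics)
def aEntry (seg : List (String × String)) (cs label : String) : List (String × String) :=
  ((PySem.Dict.mk seg).insert "speaker" cs |>.insert "turn_id" label).items

def add_speaker_labels (segments : List (List (String × String))) : List (List (String × String)) :=
  (segments.foldl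
    (fun (st : List (List (String × String)) × String × Int × Int) seg =>
      let labeled := st.1
      let cs := st.2.1
      let dc := st.2.2.1
      let pc := st.2.2.2
      if cs == "D" then
        let dc' := dc + 1
        (labeled ++ [aEntry seg cs ("D-" ++ PySem.Int.toStr dc')], "P", dc', pc)
      else
        let pc' := pc + 1
        (labeled ++ [aEntry seg cs ("P-" ++ PySem.Int.toStr pc')], "D", dc, pc'))
    ([], "D", 0, 0)).1

-- ===== PORT B =====
def bLabeled (i : Int) (seg : List (String × String)) : List (String × String) :=
  let sp := if PySem.Int.mod i 2 == 0 then "D" else "P"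
  ((PySem.Dict.mk seg).insert "speaker" sp
      |>.insert "turn_id" (sp ++ "-" ++ PySem.Int.toStr (PySem.Int.floordiv i 2 + 1))).items

def add_speaker_labels_alt (segments : List (List (String × String))) : List (List (String × String)) :=
  (PySem.List.enumerate segments).map (fun p => bLabeled p.1 p.2)

-- ===== PRECONDITION & SPEC =====
def Spec_add_speaker_labels (segments : List (List (String × String))) (out : List (List (String × String))) : Prop := out = add_speaker_labels_alt segments
instance (segments : List (List (String × String))) (out : List (List (String × String))) : Decidable (Spec_add_speaker_labels segments out) := by unfold Spec_add_speaker_labels; infer_instance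

-- ===== CLAIM (what is proved, stated in full; the proofs are below) =====
def Claim_equal_add_speaker_labels : Prop := ∀ (segments : List (List (String × String))), Dom_add_speaker_labels segments → Spec_add_speaker_labels segments (add_speaker_labels segments)

-- ===== LEMMAS AND PROOFS =====

-- the state of A's loop after k iterations
def aState (k : Nat) : String × Int × Int :=
  (if k % 2 = 0 then "D" else "P", (((k + 1) / 2 : Nat) : Int), ((k / 2 : Nat) : Int))

lemma key_lemma (segments : List (List (String × String)))
    (k : Nat) (acc : List (List (String × String))) :
    (segments.foldl
      (fun (st : List (List (String × String)) × String × Int × Int) seg =>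
        let labeled := st.1
        let cs := st.2.1
        let dc := st.2.2.1
        let pc := st.2.2.2
        if cs == "D" then
          let dc' := dc + 1
          (labeled ++ [aEntry seg cs ("D-" ++ PySem.Int.toStr dc')], "P", dc', pc)
        else
          let pc' := pc + 1
          (labeled ++ [aEntry seg cs ("P-" ++ PySem.Int.toStr pc')], "D", dc, pc'))
      (acc, aState k)).1
    = acc ++ (PySem.List.enumerate segments (k : Int)).map (fun p => bLabeled p.1 p.2) := by
  induction segments generalizing k acc with
  | nil => simp [PySem.List.enumerate_nil]
  | cons seg rest ih =>
    rw [PySem.List.enumerate_cons]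
    by_cases hk : k % 2 = 0
    · have h1 : aState k = ("D", (((k + 1) / 2 : Nat) : Int), ((k / 2 : Nat) : Int)) := by
        simp [aState, hk]
      have hstep : (((k + 1) / 2 : Nat) : Int) + 1 = (((k + 1 + 1) / 2 : Nat) : Int) := by
        omega
      have hnext : ("P", (((k + 1 + 1) / 2 : Nat) : Int), ((k / 2 : Nat) : Int)) = aState (k + 1) := by
        simp [aState]; omega
      have hb : bLabeled (k : Int) seg
          = aEntry seg "D" ("D-" ++ PySem.Int.toStr ((((k + 1) / 2 : Nat) : Int) + 1)) := by
        have hdvd : (2 : Int) ∣ (k : Int) := by omega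
        have harg : (k : Int) / 2 + 1 = (((k + 1) / 2 : Nat) : Int) + 1 := by omega
        simp [bLabeled, aEntry, hdvd, harg]
      rw [h1]
      simp only [List.foldl_cons, beq_self_eq_true, if_true]
      rw [hstep, hnext, ih (k + 1)]
      simp only [List.map_cons]
      rw [hb, ← hstep]
      simp
    · have h1 : aState k = ("P", (((k + 1) / 2 : Nat) : Int), ((k / 2 : Nat) : Int)) := by
        simp [aState, hk]
      have hstep : (((k / 2) : Nat) : Int) + 1 = (((k + 1) / 2 : Nat) : Int) := by
        omega
      have hnext : ("D", (((k + 1) / 2 : Nat) : Int), (((k + 1) / 2 : Nat) : Int)) = aState (k + 1) := by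
        simp [aState]; omega
      have hb : bLabeled (k : Int) seg
          = aEntry seg "P" ("P-" ++ PySem.Int.toStr ((((k / 2) : Nat) : Int) + 1)) := by
        have hndvd : ¬ (2 : Int) ∣ (k : Int) := by omega
        have harg : (k : Int) / 2 + 1 = (((k / 2) : Nat) : Int) + 1 := by omega
        simp [bLabeled, aEntry, hndvd, harg]
      rw [h1]
      simp only [List.foldl_cons, show (("P" : String) == "D") = false from rfl,
        Bool.false_eq_true, if_false]
      rw [hstep, hnext, ih (k + 1)]
      simp only [List.map_cons]
      rw [hb, ← hstep]
      simp

-- ===== VERDICT (by name: the statement is the Claim_ definition above) =====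
theorem add_speaker_labels_spec : Claim_equal_add_speaker_labels := by
  intro segments _
  show add_speaker_labels segments = add_speaker_labels_alt segments
  have h := key_lemma segments 0 []
  simpa [add_speaker_labels, add_speaker_labels_alt, aState] using h
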